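-- pv_equiv track=rewrite | github.com/jvadair/simple-brute-forcer | brute_forcer.py | iter_str
-- ===== SOURCE A (Python) =====
-- chars = 'abcdefghijklmnopqrstuvwxyz1234567890'  # Easily changeable
--
-- def iterchar(item, pos):
--     item_old = item
--     item = list(item)
--     char = item.pop(pos)
--     newchar = chars[chars.index(char) + 1]
--     item.insert(pos, newchar)
--     item = ''.join(item)[:pos + 1]
--     item += chars[0] * (len(item_old) - len(item))
--     return item
--
-- def iter_str(prev):
--     n = 0
--     fullreplace = True
--     for char in prev[::-1]:  # reversed
--         if char != chars[len(chars) - 1]:  # if not last char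
--             fullreplace = False
--             break
--         else:
--             n += 1
--     if fullreplace:
--         return chars[0] * (len(prev) + 1)  # ex: '000' --> 'aaaa'
--     else:
--         n = len(prev) - n - 1
--         return iterchar(prev, n)
-- ===== SOURCE B (Python) =====
-- chars = 'abcdefghijklmnopqrstuvwxyz1234567890'  # Easily changeable
--
--
-- def iter_str(prev):
--     # Recursive odometer carry on the reversed character list.
--     def inc(rev):
--         if not rev:
--             return [chars[0]]
--         j = chars.index(rev[0])
--         if j + 1 < len(chars):
--             return [chars[j + 1]] + rev[1:]
--         return [chars[0]] + inc(rev[1:])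
--     return ''.join(reversed(inc(list(reversed(prev)))))
-- ===== Notes on version B (the rewrite author's own statement) =====
-- stated objective: simpler
-- what changed: A counts trailing max-chars with a flag loop and then rebuilds via pop/index/insert/join/slice/pad in iterchar; B is a single recursive carry-propagation over the reversed character list with no separate counting pass or rebuild helper.
import Mathlib
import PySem

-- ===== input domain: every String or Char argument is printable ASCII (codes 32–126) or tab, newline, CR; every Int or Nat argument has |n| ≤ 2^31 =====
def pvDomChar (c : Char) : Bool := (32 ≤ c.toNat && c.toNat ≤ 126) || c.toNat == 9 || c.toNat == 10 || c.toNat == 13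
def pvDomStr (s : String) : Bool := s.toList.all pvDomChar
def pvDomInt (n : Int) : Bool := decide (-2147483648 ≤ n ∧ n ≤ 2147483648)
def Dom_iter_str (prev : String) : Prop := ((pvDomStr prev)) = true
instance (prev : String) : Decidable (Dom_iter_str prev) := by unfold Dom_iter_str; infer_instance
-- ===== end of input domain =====

-- B replaces A's count-trailing-max loop + pop/index/insert/join/slice/pad rebuild (iterchar)
-- by one recursive carry pass over the reversed character list (objective: simpler).

def pvChars : List Char := "abcdefghijklmnopqrstuvwxyz1234567890".toList

-- ===== PORT A =====
def pvFirst : Char := (PySem.List.pyGet? pvChars 0).getD '!'     -- chars[0] (in range)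
def pvLast : Char := (PySem.List.pyGet? pvChars ((pvChars.length : Int) - 1)).getD '!'  -- chars[len(chars)-1]

def iterchar (item : String) (pos : Int) : String :=
  let itemOld := item.toList
  match PySem.List.pop? item.toList pos with
  | none => ""      -- IndexError (never reached: iter_str passes an in-range pos)
  | some (char, lst1) =>
    match PySem.List.index? pvChars char with
    | none => ""    -- ValueError: char not in chars — excluded by Pre_
    | some i =>
      match PySem.List.pyGet? pvChars ((i : Int) + 1) with
      | none => ""  -- IndexError (never reached: char ≠ chars[-1] here)
      | some newchar =>
        let lst2 := PySem.List.insert lst1 pos newchar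
        let item2 := PySem.List.slice lst2 none (some (pos + 1))     -- [:pos+1]
        String.ofList (item2 ++ PySem.List.pyRepeat [pvFirst] ((itemOld.length : Int) - item2.length))

-- the for-loop over prev[::-1] with `break`: n = positions counted, fullreplace = no break
def pvScanA : List Char → Int × Bool
  | [] => (0, true)
  | c :: rest =>
      if c ≠ pvLast then (0, false)
      else
        let p := pvScanA rest
        (p.1 + 1, p.2)

def iter_str (prev : String) : String :=
  let rev := (PySem.List.slice? prev.toList none none (-1)).getD []   -- prev[::-1]
  let p := pvScanA rev
  if p.2 then
    String.ofList (PySem.List.pyRepeat [pvFirst] ((prev.toList.length : Int) + 1))  -- chars[0]*(len+1)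
  else
    iterchar prev ((prev.toList.length : Int) - p.1 - 1)

-- ===== PORT B =====
def pvInc : List Char → List Char
  | [] => [pvFirst]
  | c :: rest =>
    match PySem.List.index? pvChars c with
    | none => []  -- ValueError: char not in chars — excluded by Pre_
    | some j =>
      if (j : Int) + 1 < (pvChars.length : Int) then
        (PySem.List.pyGet? pvChars ((j : Int) + 1)).getD '!' :: rest  -- in range by the guard
      else
        pvFirst :: pvInc rest

def iter_str_alt (prev : String) : String :=
  String.ofList ((pvInc prev.toList.reverse).reverse)

-- ===== PRECONDITION & SPEC =====
-- A (and B) raise ValueError iff, after the trailing run of '0' = chars[-1], the last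
-- remaining character of prev is not in chars; Pre_ excludes exactly those inputs.
def Pre_iter_str (prev : String) : Prop :=
  ((prev.toList.reverse.dropWhile (fun c => c == '0')).headD '0') ∈ pvChars
instance (prev : String) : Decidable (Pre_iter_str prev) := by unfold Pre_iter_str; infer_instance

def pvWitness_iter_str : String := "ab0"

def Spec_iter_str (prev : String) (out : String) : Prop := out = iter_str_alt prev
instance (prev : String) (out : String) : Decidable (Spec_iter_str prev out) := by unfold Spec_iter_str; infer_instance

-- ===== CLAIM (what is proved, stated in full; the proofs are below) =====
def Claim_equal_iter_str : Prop := ∀ (prev : String), Dom_iter_str prev → Pre_iter_str prev → Spec_iter_str prev (iter_str prev)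

-- ===== LEMMAS AND PROOFS =====

theorem pvLast_eq : pvLast = '0' := by decide
theorem pvFirst_eq : pvFirst = 'a' := by decide
theorem pvChars_len : pvChars.length = 36 := by decide

theorem dropWhile_head_false {p : Char → Bool} {l : List Char} {c : Char} {rest : List Char}
    (h : l.dropWhile p = c :: rest) : p c = false := by
  induction l with
  | nil => simp at h
  | cons a l ih =>
    rw [List.dropWhile_cons] at h
    by_cases hp : p a = true
    · rw [if_pos hp] at h; exact ih h
    · rw [if_neg hp] at h
      cases h
      simpa using hp

theorem pvScanA_eq (r : List Char) :
    pvScanA r = (((r.takeWhile (fun c => c == '0')).length : Int), r.all (fun c => c == '0')) := by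
  induction r with
  | nil => rfl
  | cons c rest ih =>
    by_cases h : c = '0'
    · subst h
      have : ('0' == '0') = true := by decide
      simp only [pvScanA, pvLast_eq, ne_eq, not_true_eq_false, if_false, ih,
        List.takeWhile_cons, this, if_true, List.all_cons, List.length_cons]
      refine Prod.ext ?_ rfl
      push_cast; ring
    · have hb : (c == '0') = false := by simpa using h
      simp [pvScanA, pvLast_eq, h, hb]

theorem takeWhile_zero_replicate (r : List Char) :
    r.takeWhile (fun c => c == '0') = List.replicate (r.takeWhile (fun c => c == '0')).length '0' := by
  rw [List.eq_replicate_iff]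
  exact ⟨rfl, fun b hb => by simpa using (List.mem_takeWhile_imp hb)⟩

theorem pvInc_replicate (k : Nat) (t : List Char) :
    pvInc (List.replicate k '0' ++ t) = List.replicate k 'a' ++ pvInc t := by
  induction k with
  | zero => simp
  | succ k ih =>
    rw [List.replicate_succ, List.cons_append, List.replicate_succ, List.cons_append]
    have hidx : PySem.List.index? pvChars '0' = some 35 := by decide
    show (match PySem.List.index? pvChars '0' with
      | none => []
      | some j =>
        if (j : Int) + 1 < (pvChars.length : Int) then
          (PySem.List.pyGet? pvChars ((j : Int) + 1)).getD '!' :: (List.replicate k '0' ++ t)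
        else pvFirst :: pvInc (List.replicate k '0' ++ t)) = _
    simp only [hidx]
    rw [if_neg (by decide)]
    rw [ih, pvFirst_eq]

theorem pop?_append_cons {α : Type} (pre : List α) (c : α) (suf : List α) :
    PySem.List.pop? (pre ++ c :: suf) ((pre.length : Nat) : Int) = some (c, pre ++ suf) := by
  rw [PySem.List.pop?_natCast _ _ (by simp)]
  congr 1
  refine Prod.ext ?_ ?_
  · show (pre ++ c :: suf)[pre.length]'_ = c
    rw [List.getElem_append_right (Nat.le_refl _)]
    simp
  · show (pre ++ c :: suf).eraseIdx pre.length = pre ++ suf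
    rw [List.eraseIdx_append, if_neg (by omega)]
    simp

theorem iter_str_spec' (prev : String) (hp : Pre_iter_str prev) :
    iter_str prev = iter_str_alt prev := by
  unfold iter_str iter_str_alt
  rw [PySem.List.slice?_none_none_neg_one]
  simp only [Option.getD_some]
  set r := prev.toList.reverse with hr
  rw [pvScanA_eq]
  set k := (r.takeWhile (fun c => c == '0')).length with hk
  have hsplit : List.replicate k '0' ++ r.dropWhile (fun c => c == '0') = r := by
    rw [← takeWhile_zero_replicate]; exact List.takeWhile_append_dropWhile
  by_cases hall : r.all (fun c => c == '0') = true
  · -- fullreplace: every char is '0'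
    have hrep : r = List.replicate r.length '0' := by
      rw [List.eq_replicate_iff]
      exact ⟨rfl, fun b hb => by simpa using (List.all_eq_true.mp hall) b hb⟩
    have hlen : prev.toList.length = r.length := by rw [hr, List.length_reverse]
    simp only [hall, if_true]
    have hB : pvInc r = List.replicate (r.length + 1) 'a' := by
      calc pvInc r = pvInc (List.replicate r.length '0' ++ []) := by rw [List.append_nil, ← hrep]
        _ = List.replicate r.length 'a' ++ pvInc [] := pvInc_replicate _ _
        _ = List.replicate (r.length + 1) 'a' := by
            simp [pvInc, pvFirst_eq, List.replicate_succ']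
    rw [hB, hlen]
    congr 1
    rw [PySem.List.pyRepeat_singleton, pvFirst_eq]
    have h1 : ((r.length : Int) + 1).toNat = r.length + 1 := by omega
    rw [h1, List.reverse_replicate]
  · -- there is a non-'0' char; Pre_ says it is in chars
    simp only [hall]
    obtain ⟨c, rest, ht⟩ : ∃ c rest, r.dropWhile (fun c => c == '0') = c :: rest := by
      rcases hd : r.dropWhile (fun c => c == '0') with _ | ⟨c, rest⟩
      · exfalso
        apply hall
        have h0 : r = List.replicate k '0' := by
          rw [← hsplit, hd, List.append_nil]
        rw [h0]
        simp
      · exact ⟨c, rest, rfl⟩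
    have hc0 : (c == '0') = false := dropWhile_head_false (p := fun c => c == '0') ht
    have hcne : c ≠ '0' := by simpa using hc0
    have hcmem : c ∈ pvChars := by
      unfold Pre_iter_str at hp; rw [← hr, ht] at hp; simpa using hp
    have hrs : r = List.replicate k '0' ++ c :: rest := by rw [← hsplit, ht]
    have hl : prev.toList = rest.reverse ++ c :: List.replicate k '0' := by
      have h2 : prev.toList = r.reverse := by rw [hr, List.reverse_reverse]
      rw [h2, hrs]
      simp [List.reverse_replicate]
    have hlen : prev.toList.length = rest.length + 1 + k := by
      rw [hl]; simp; omega
    have hpos : (prev.toList.length : Int) - (k : Int) - 1 = ((rest.reverse.length : Nat) : Int) := by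
      rw [hlen]; push_cast; simp only [List.length_reverse]; ring
    -- index of c in chars
    obtain ⟨j, hj⟩ : ∃ j, PySem.List.index? pvChars c = some j := by
      rcases hj0 : PySem.List.index? pvChars c with _ | j
      · have h5 : (PySem.List.index? pvChars c).isSome = true := by
          rw [PySem.List.index?_eq_idxOf?, List.isSome_idxOf?]
          exact hcmem
        rw [hj0] at h5; simp at h5
      · exact ⟨j, rfl⟩
    obtain ⟨hjlt, hjc, -⟩ := PySem.List.getElem_of_index?_eq_some hj
    rw [pvChars_len] at hjlt
    have hjc? : pvChars[j]? = some c := by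
      rw [List.getElem?_eq_getElem (by rw [pvChars_len]; omega), hjc]
    have hj35 : j < 35 := by
      by_contra hge
      have hj36 : j = 35 := by omega
      rw [hj36] at hjc?
      have h6 : some '0' = some c := by rw [← hjc?]; decide
      exact hcne (Option.some.inj h6).symm
    obtain ⟨nc, hnc⟩ : ∃ nc, pvChars[j+1]? = some nc := by
      rw [List.getElem?_eq_getElem (by rw [pvChars_len]; omega)]
      exact ⟨_, rfl⟩
    have hget : PySem.List.pyGet? pvChars ((j : Int) + 1) = some nc := by
      have h3 : ((j : Int) + 1) = ((j + 1 : Nat) : Int) := by push_cast; ring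
      rw [h3, PySem.List.pyGet?_natCast, hnc]
    -- A side
    unfold iterchar
    rw [hpos, hl, pop?_append_cons]
    simp only [hj, hget]
    have hins : PySem.List.insert (rest.reverse ++ List.replicate k '0')
        ((rest.reverse.length : Nat) : Int) nc
        = rest.reverse ++ nc :: List.replicate k '0' := by
      rw [PySem.List.insert_natCast _ _ _ (by simp)]
      simp
    rw [hins]
    have hslice : PySem.List.slice (rest.reverse ++ nc :: List.replicate k '0')
        none (some (((rest.reverse.length : Nat) : Int) + 1))
        = rest.reverse ++ [nc] := by
      have h4 : ((rest.reverse.length : Nat) : Int) + 1 = ((rest.reverse.length + 1 : Nat) : Int) := by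
        push_cast; ring
      rw [h4, PySem.List.slice_to_natCast, List.take_append]
      simp [List.take_of_length_le]
    rw [hslice]
    have hpad : (((rest.reverse ++ c :: List.replicate k '0').length : Int)
        - ((rest.reverse ++ [nc]).length : Int)) = (k : Int) := by
      simp
    rw [hpad, PySem.List.pyRepeat_singleton, pvFirst_eq]
    -- B side
    have hB : pvInc r = List.replicate k 'a' ++ nc :: rest := by
      rw [hrs, pvInc_replicate]
      congr 1
      show (match PySem.List.index? pvChars c with
        | none => []
        | some j =>
          if (j : Int) + 1 < (pvChars.length : Int) then
            (PySem.List.pyGet? pvChars ((j : Int) + 1)).getD '!' :: rest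
          else pvFirst :: pvInc rest) = _
      simp only [hj]
      rw [if_pos (by rw [pvChars_len]; push_cast; omega)]
      rw [hget]
      rfl
    rw [hB]
    simp [List.reverse_replicate]

-- ===== VERDICT (by name: the statement is the Claim_ definition above) =====
theorem iter_str_spec : Claim_equal_iter_str := by
  intro prev _ hp
  exact iter_str_spec' prev hp
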